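-- pv_equiv track=rewrite | github.com/guyfreund/BHA | playing_arround/split.py | solution
-- ===== SOURCE A (Python) =====
-- def solution(S):
--     # write your code in Python 3.6
--     index_of_a = []
--     for index, c in enumerate(S):
--         if c == 'a':
--             index_of_a.append(index)
--
--     num_a = len(index_of_a)
--     if num_a % 3 != 0:
--         # number of 'a' in S does not divide by 3
--         return 0
--
--     if num_a == 0:
--         # S contains only 'b', so we need to return the number of
--         # partitions of S into 3 sub-strings,:
--         len_s = len(S)
--         return (len_s - 1) * (len_s - 2) // 2
--
--     num_a_in_substring = num_a // 3
--
--     first_b_interval_start = index_of_a[num_a_in_substring - 1]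
--     first_b_interval_end = index_of_a[num_a_in_substring]
--     len_first_b_interval = first_b_interval_end - first_b_interval_start
--
--     second_b_interval_start = index_of_a[2 * num_a_in_substring - 1]
--     second_b_interval_end = index_of_a[2 * num_a_in_substring]
--     len_second_b_interval = second_b_interval_end - second_b_interval_start
--
--     # number of ways to partition is the product of the lengths of the interval of 'b'
--     # for example: in S = babbaba, first b interval is S[2]...S[3] and second b
--     # interval is S[5]
--     return len_first_b_interval * len_second_b_interval
-- ===== SOURCE B (Python) =====
-- def solution(S):
--     # count total 'a's
--     total = 0
--     for c in S:
--         if c == 'a':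
--             total += 1
--     if total % 3 != 0:
--         return 0
--     n = len(S)
--     if total == 0:
--         return (n - 1) * (n - 2) // 2
--     k = total // 3
--     # single scan: count cut positions where the running 'a'-count is k (resp. 2k)
--     run = 0
--     w1 = 0
--     w2 = 0
--     for c in S:
--         if c == 'a':
--             run += 1
--         if run == k:
--             w1 += 1
--         elif run == 2 * k:
--             w2 += 1
--     return w1 * w2
-- ===== Notes on version B (the rewrite author's own statement) =====
-- stated objective: alternative
-- what changed: B drops A's stored index list and its gap subtraction: it counts the 'a's in one pass and then tallies, in a single running-prefix-count scan, the positions where the count equals k and 2k, multiplying the two tallies.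
import Mathlib
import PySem

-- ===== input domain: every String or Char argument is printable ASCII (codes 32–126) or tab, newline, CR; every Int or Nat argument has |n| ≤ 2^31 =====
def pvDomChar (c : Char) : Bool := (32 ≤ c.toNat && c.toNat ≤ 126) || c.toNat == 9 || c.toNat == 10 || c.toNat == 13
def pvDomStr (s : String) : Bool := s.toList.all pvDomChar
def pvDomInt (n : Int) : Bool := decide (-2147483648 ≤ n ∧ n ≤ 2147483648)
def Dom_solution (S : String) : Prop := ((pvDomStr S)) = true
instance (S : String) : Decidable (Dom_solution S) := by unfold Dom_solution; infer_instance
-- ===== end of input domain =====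

-- B replaces A's stored index list and gap subtraction by one direct scan tallying the cut
-- positions where the running 'a'-count equals k resp. 2k (objective: alternative, same O(n) cost).

-- ===== PORT A =====
-- literal port of A: collect indices of 'a' via enumerate, then gap products.
-- the pyGet? lookups are always in range here (numA ≥ 3 on that branch), so .getD 0 is never taken.
def solution (S : String) : Int :=
  let indexOfA : List Int :=
    (PySem.List.enumerate S.toList).foldl
      (fun acc p => if p.2 == 'a' then acc ++ [p.1] else acc) []
  let numA : Int := indexOfA.length
  if PySem.Int.mod numA 3 ≠ 0 then 0
  else if numA = 0 then
    let lenS : Int := PySem.Str.len S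
    PySem.Int.floordiv ((lenS - 1) * (lenS - 2)) 2
  else
    let q : Int := PySem.Int.floordiv numA 3
    let firstStart := (PySem.List.pyGet? indexOfA (q - 1)).getD 0
    let firstEnd := (PySem.List.pyGet? indexOfA q).getD 0
    let lenFirst := firstEnd - firstStart
    let secondStart := (PySem.List.pyGet? indexOfA (2 * q - 1)).getD 0
    let secondEnd := (PySem.List.pyGet? indexOfA (2 * q)).getD 0
    let lenSecond := secondEnd - secondStart
    lenFirst * lenSecond

-- ===== PORT B =====
def solution_alt (S : String) : Int :=
  let total : Int := S.toList.foldl (fun acc c => if c == 'a' then acc + 1 else acc) 0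
  if PySem.Int.mod total 3 ≠ 0 then 0
  else
    let n : Int := PySem.Str.len S
    if total = 0 then PySem.Int.floordiv ((n - 1) * (n - 2)) 2
    else
      let k : Int := PySem.Int.floordiv total 3
      let st := S.toList.foldl
        (fun (st : Int × Int × Int) c =>
          let run := if c == 'a' then st.1 + 1 else st.1
          if run == k then (run, st.2.1 + 1, st.2.2)
          else if run == 2 * k then (run, st.2.1, st.2.2 + 1)
          else (run, st.2.1, st.2.2)) (0, 0, 0)
      st.2.1 * st.2.2

-- ===== PRECONDITION & SPEC =====
def Spec_solution (S : String) (out : Int) : Prop := out = solution_alt S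
instance (S : String) (out : Int) : Decidable (Spec_solution S out) := by unfold Spec_solution; infer_instance

-- ===== CLAIM (what is proved, stated in full; the proofs are below) =====
def Claim_equal_solution : Prop := ∀ (S : String), Dom_solution S → Spec_solution S (solution S)

-- ===== LEMMAS AND PROOFS =====

-- index (0-based, within l) of the (m+1)-th 'a' of l (meaningful when m < l.count 'a')
def nthA : List Char → Nat → Nat
  | [], _ => 0
  | c :: t, m =>
    if c = 'a' then (match m with | 0 => 0 | m + 1 => nthA t m + 1)
    else nthA t m + 1

-- number of positions j of l at which, starting from s already-seen 'a's,
-- the running 'a'-count after l[j] equals k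
def cntFrom : List Char → Nat → Nat → Nat
  | [], _, _ => 0
  | c :: t, s, k =>
    let s' := if c = 'a' then s + 1 else s
    (if s' = k then 1 else 0) + cntFrom t s' k

-- A's built list, abstracted
def idxs (l : List Char) (s : Int) : List Int :=
  ((PySem.List.enumerate l s).filter (fun p => p.2 == 'a')).map (fun p => p.1)

theorem idxs_nil (s : Int) : idxs [] s = [] := by
  simp [idxs, PySem.List.enumerate_nil]

theorem idxs_cons (c : Char) (t : List Char) (s : Int) :
    idxs (c :: t) s = if c = 'a' then s :: idxs t (s + 1) else idxs t (s + 1) := by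
  by_cases h : c = 'a' <;> simp [idxs, PySem.List.enumerate_cons, h]

theorem length_idxs (l : List Char) (s : Int) : (idxs l s).length = l.count 'a' := by
  induction l generalizing s with
  | nil => simp [idxs_nil]
  | cons c t ih =>
    by_cases h : c = 'a' <;> simp [idxs_cons, h, ih]

theorem idxs_get (l : List Char) (s : Int) (m : Nat) (hm : m < l.count 'a') :
    (idxs l s)[m]? = some (s + (nthA l m : Int)) := by
  induction l generalizing s m with
  | nil => simp [List.count_nil] at hm
  | cons c t ih =>
    by_cases h : c = 'a'
    · cases m with
      | zero => simp [idxs_cons, h, nthA]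
      | succ m =>
        have hm' : m < t.count 'a' := by
          simp [h] at hm; omega
        simp [idxs_cons, h, nthA, ih _ _ hm']
        ring
    · have hm' : m < t.count 'a' := by
        simp [h] at hm; omega
      simp [idxs_cons, h, nthA, ih _ _ hm']
      ring

theorem cntFrom_zero_of_gt (l : List Char) (s k : Nat) (h : k < s) : cntFrom l s k = 0 := by
  induction l generalizing s with
  | nil => rfl
  | cons c t ih =>
    by_cases hc : c = 'a' <;> simp [cntFrom, hc] <;>
      first
        | exact ⟨by omega, ih (s + 1) (by omega)⟩
        | exact ⟨by omega, ih s h⟩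

theorem cntFrom_main (l : List Char) (s k : Nat) (hs : s ≤ k)
    (hcnt : k - s < l.count 'a') :
    cntFrom l s k + (if s < k then nthA l (k - s - 1) else 0) = nthA l (k - s) := by
  induction l generalizing s with
  | nil => simp at hcnt
  | cons c t ih =>
    by_cases hc : c = 'a'
    · subst hc
      have hcount : ('a' :: t).count 'a' = t.count 'a' + 1 := by simp
      have hcc : cntFrom ('a' :: t) s k = (if s + 1 = k then 1 else 0) + cntFrom t (s + 1) k := by
        simp [cntFrom]
      by_cases h1 : s + 1 < k
      · obtain ⟨d, hd⟩ : ∃ d, k - s = d + 2 := ⟨k - s - 2, by omega⟩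
        have ihs := ih (s + 1) (by omega) (by omega)
        rw [if_pos h1, show k - (s + 1) = d + 1 from by omega] at ihs
        simp only [Nat.add_sub_cancel] at ihs
        rw [hd, hcc, if_neg (show ¬ s + 1 = k by omega), if_pos (show s < k by omega)]
        simp only [show d + 2 - 1 = d + 1 from by omega]
        simp [nthA]
        omega
      · by_cases h2 : s + 1 = k
        · have ihs := ih (s + 1) (by omega) (by omega)
          rw [if_neg (show ¬ s + 1 < k by omega), show k - (s + 1) = 0 from by omega] at ihs
          rw [hcc, if_pos h2, if_pos (show s < k by omega), show k - s = 1 from by omega]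
          simp [nthA]
          omega
        · have hz : cntFrom t (s + 1) k = 0 := cntFrom_zero_of_gt t (s + 1) k (by omega)
          rw [hcc, if_neg (show ¬ s + 1 = k by omega), if_neg (show ¬ s < k by omega),
            show k - s = 0 from by omega]
          simp [nthA, hz]
    · have hcount : (c :: t).count 'a' = t.count 'a' := by simp [hc]
      have hcc : cntFrom (c :: t) s k = (if s = k then 1 else 0) + cntFrom t s k := by
        simp [cntFrom, hc]
      have hn : ∀ m, nthA (c :: t) m = nthA t m + 1 := by
        intro m; cases m <;> simp [nthA, hc]
      by_cases h1 : s < k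
      · have ihs := ih s hs (by omega)
        rw [if_pos h1] at ihs
        rw [hcc, if_neg (show ¬ s = k by omega), if_pos h1, hn, hn]
        omega
      · have ihs := ih s hs (by omega)
        rw [if_neg h1] at ihs
        rw [hcc, if_pos (show s = k by omega), if_neg h1, hn]
        omega

-- B's scan, characterised: running total plus the two tallies
theorem foldB (kn : Nat) (hk : 1 ≤ kn) (l : List Char) (s w1 w2 : Nat) :
    l.foldl
      (fun (st : Int × Int × Int) c =>
        if (if c == 'a' then st.1 + 1 else st.1) == (kn : Int) then
          ((if c == 'a' then st.1 + 1 else st.1), st.2.1 + 1, st.2.2)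
        else if (if c == 'a' then st.1 + 1 else st.1) == 2 * (kn : Int) then
          ((if c == 'a' then st.1 + 1 else st.1), st.2.1, st.2.2 + 1)
        else ((if c == 'a' then st.1 + 1 else st.1), st.2.1, st.2.2))
      ((s : Int), (w1 : Int), (w2 : Int))
    = (((s + l.count 'a' : Nat) : Int), ((w1 + cntFrom l s kn : Nat) : Int),
       ((w2 + cntFrom l s (2 * kn) : Nat) : Int)) := by
  induction l generalizing s w1 w2 with
  | nil => simp [cntFrom]
  | cons c t ih =>
    rw [List.foldl_cons]
    dsimp only
    have hrun : (if (c == 'a') = true then (s : Int) + 1 else (s : Int))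
        = ((if c = 'a' then s + 1 else s : Nat) : Int) := by
      by_cases hc : c = 'a' <;> simp [hc]
    rw [hrun]
    set sn : Nat := (if c = 'a' then s + 1 else s) with hsn
    have hcc1 : cntFrom (c :: t) s kn = (if sn = kn then 1 else 0) + cntFrom t sn kn := by
      by_cases hc : c = 'a' <;> simp [cntFrom, hsn, hc]
    have hcc2 : cntFrom (c :: t) s (2 * kn)
        = (if sn = 2 * kn then 1 else 0) + cntFrom t sn (2 * kn) := by
      by_cases hc : c = 'a' <;> simp [cntFrom, hsn, hc]
    have hcnt2 : (c :: t).count 'a' + s = t.count 'a' + sn := by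
      by_cases hc : c = 'a' <;> simp [hsn, hc] <;> omega
    by_cases h1 : sn = kn
    · rw [if_pos (show ((sn : Int) == (kn : Int)) = true by simp [h1])]
      rw [show (w1 : Int) + 1 = ((w1 + 1 : Nat) : Int) from by push_cast; rfl]
      rw [ih sn (w1 + 1) w2]
      simp only [Prod.mk.injEq, Nat.cast_inj, hcc1, hcc2]
      refine ⟨by omega, by split_ifs <;> omega, by split_ifs <;> omega⟩
    · rw [if_neg (show ¬ ((sn : Int) == (kn : Int)) = true by simp [h1])]
      by_cases h2 : sn = 2 * kn
      · rw [if_pos (show ((sn : Int) == 2 * (kn : Int)) = true by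
          rw [beq_iff_eq, h2]; push_cast; ring)]
        rw [show (w2 : Int) + 1 = ((w2 + 1 : Nat) : Int) from by push_cast; rfl]
        rw [ih sn w1 (w2 + 1)]
        simp only [Prod.mk.injEq, Nat.cast_inj, hcc1, hcc2]
        refine ⟨by omega, by split_ifs <;> omega, by split_ifs <;> omega⟩
      · rw [if_neg (show ¬ ((sn : Int) == 2 * (kn : Int)) = true by
          rw [beq_iff_eq]; push_cast; omega)]
        rw [ih sn w1 w2]
        simp only [Prod.mk.injEq, Nat.cast_inj, hcc1, hcc2]
        refine ⟨by omega, by split_ifs <;> omega, by split_ifs <;> omega⟩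

theorem solution_spec : Claim_equal_solution := by
  intro S _
  unfold Spec_solution solution solution_alt
  have hA : (PySem.List.enumerate S.toList).foldl
      (fun acc p => if p.2 == 'a' then acc ++ [p.1] else acc) ([] : List Int)
      = idxs S.toList 0 := by
    rw [PySem.List.foldl_append_if (fun (x : Int × Char) => x.2 == 'a') (fun (x : Int × Char) => x.1)]
    simp [idxs]
  have hB : S.toList.foldl (fun acc c => if c == 'a' then acc + 1 else acc) (0 : Int)
      = ((S.toList.count 'a' : Nat) : Int) := by
    rw [PySem.List.foldl_beq_add_one]
    ring
  rw [hA, hB]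
  dsimp only
  set l := S.toList with hl
  set cn := l.count 'a' with hcn
  have hlen : ((idxs l 0).length : Int) = (cn : Int) := by rw [length_idxs]
  have hmod : PySem.Int.mod ((cn : Nat) : Int) 3 = ((cn % 3 : Nat) : Int) := by
    rw [PySem.Int.mod_eq_emod_of_pos (by norm_num)]
    omega
  rw [hlen]
  split_ifs with hmod3 hzero
  · rfl
  · rfl
  · -- main case: cn = 3k, k ≥ 1
    have h3 : cn % 3 = 0 := by
      have := hmod3
      rw [hmod] at this
      omega
    have h0 : cn ≠ 0 := by
      intro h
      exact hzero (by exact_mod_cast congrArg (Nat.cast (R := Int)) h)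
    obtain ⟨k, hk⟩ : ∃ k, cn = 3 * k := ⟨cn / 3, by omega⟩
    have hk1 : 1 ≤ k := by omega
    have hdiv : PySem.Int.floordiv ((cn : Nat) : Int) 3 = ((k : Nat) : Int) := by
      rw [PySem.Int.floordiv_eq_ediv_of_pos (by norm_num), hk]
      push_cast
      omega
    rw [hdiv]
    -- A side: the four list lookups
    have hget : ∀ m : Nat, m < cn →
        (PySem.List.pyGet? (idxs l 0) ((m : Nat) : Int)).getD 0 = ((nthA l m : Nat) : Int) := by
      intro m hm
      rw [PySem.List.pyGet?_natCast, idxs_get l 0 m (by omega)]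
      simp
    have e1 : ((k : Nat) : Int) - 1 = ((k - 1 : Nat) : Int) := by omega
    have e2 : 2 * ((k : Nat) : Int) - 1 = ((2 * k - 1 : Nat) : Int) := by omega
    have e3 : 2 * ((k : Nat) : Int) = ((2 * k : Nat) : Int) := by omega
    have g1 : (PySem.List.pyGet? (idxs l 0) ((k : Int) - 1)).getD 0
        = ((nthA l (k - 1) : Nat) : Int) := by rw [e1]; exact hget (k - 1) (by omega)
    have g2 : (PySem.List.pyGet? (idxs l 0) ((k : Nat) : Int)).getD 0
        = ((nthA l k : Nat) : Int) := hget k (by omega)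
    have g3 : (PySem.List.pyGet? (idxs l 0) (2 * (k : Int) - 1)).getD 0
        = ((nthA l (2 * k - 1) : Nat) : Int) := by rw [e2]; exact hget (2 * k - 1) (by omega)
    have g4 : (PySem.List.pyGet? (idxs l 0) (2 * (k : Int))).getD 0
        = ((nthA l (2 * k) : Nat) : Int) := by rw [e3]; exact hget (2 * k) (by omega)
    rw [g1, g2, g3, g4]
    -- B side: the scan
    have hfold := foldB k hk1 l 0 0 0
    simp only [Nat.cast_zero, Nat.zero_add] at hfold
    rw [hfold]
    have f1 : ((nthA l k : Nat) : Int) - ((nthA l (k - 1) : Nat) : Int)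
        = ((cntFrom l 0 k : Nat) : Int) := by
      have := cntFrom_main l 0 k (by omega) (by omega)
      rw [if_pos (by omega)] at this
      simp only [Nat.sub_zero] at this
      omega
    have f2 : ((nthA l (2 * k) : Nat) : Int) - ((nthA l (2 * k - 1) : Nat) : Int)
        = ((cntFrom l 0 (2 * k) : Nat) : Int) := by
      have := cntFrom_main l 0 (2 * k) (by omega) (by omega)
      rw [if_pos (by omega)] at this
      simp only [Nat.sub_zero] at this
      omega
    rw [f1, f2]
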